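-- pv_equiv track=rewrite | github.com/iLectrik04/Python | TP/TP1/Tp_1.py | nbre_jours_debut_ere
-- ===== SOURCE A (Python) =====
-- def annee_bissextile(year):
--     """
--     Determine si une annee est bissextile
--
--     :param: year(int)
--     :return: Booleen(True or False)
--     """
--     bool = False
--     if (year % 4 == 0 and
--         year % 100 != 0 or
--         year % 400 == 0):
--         bool = True
--     return bool
--
-- def nbre_jours_debut_ere(year):
--     """
--     Determine le nombre de jours depuis le début de l'ere chretienne.
--
--     :param: year(int)
--     :return: days(int)
--     """
--     days = 0
--     i = 0
--     for i in range(year):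
--         if annee_bissextile(i):
--             days += 366
--         else :
--             days += 365
--     return days
-- ===== SOURCE B (Python) =====
-- def nbre_jours_debut_ere(year):
--     if year <= 0:
--         return 0
--     # days in [0, year): 365 per year plus one per leap year; leap years in
--     # [0, year) counted in closed form with ceiling divisions (0 is leap).
--     return (365 * year
--             + (year + 3) // 4
--             - (year + 99) // 100
--             + (year + 399) // 400)
-- ===== Notes on version B (the rewrite author's own statement) =====
-- stated objective: faster
-- what changed: Replaced the per-year loop summing 365/366 with a closed-form formula: 365*year plus the leap-year count in [0, year) computed by three floor divisions.
import Mathlib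
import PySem

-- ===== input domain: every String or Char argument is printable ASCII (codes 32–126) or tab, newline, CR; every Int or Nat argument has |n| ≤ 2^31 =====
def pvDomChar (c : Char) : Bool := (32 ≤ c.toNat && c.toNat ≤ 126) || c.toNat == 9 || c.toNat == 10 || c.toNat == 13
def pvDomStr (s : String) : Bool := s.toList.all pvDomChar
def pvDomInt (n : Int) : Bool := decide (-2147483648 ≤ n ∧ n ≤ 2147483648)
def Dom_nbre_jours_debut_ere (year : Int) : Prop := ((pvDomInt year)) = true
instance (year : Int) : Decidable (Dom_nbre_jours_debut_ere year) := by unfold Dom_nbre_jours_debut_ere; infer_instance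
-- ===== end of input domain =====

-- B replaces A's per-year loop with a closed-form count of leap years (faster: O(1) vs O(year)).

-- ===== PORT A =====
def annee_bissextile (year : Int) : Bool :=
  let b := false
  if (PySem.Int.mod year 4 == 0 && PySem.Int.mod year 100 != 0) || PySem.Int.mod year 400 == 0 then
    true
  else b

def nbre_jours_debut_ere (year : Int) : Int :=
  (PySem.List.pyRange 0 year 1).foldl
    (fun days i => if annee_bissextile i then days + 366 else days + 365) 0

-- ===== PORT B =====
def nbre_jours_debut_ere_alt (year : Int) : Int :=
  if year ≤ 0 then 0
  else 365 * year
       + PySem.Int.floordiv (year + 3) 4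
       - PySem.Int.floordiv (year + 99) 100
       + PySem.Int.floordiv (year + 399) 400

-- ===== PRECONDITION & SPEC =====
def Spec_nbre_jours_debut_ere (year : Int) (out : Int) : Prop := out = nbre_jours_debut_ere_alt year
instance (year : Int) (out : Int) : Decidable (Spec_nbre_jours_debut_ere year out) := by unfold Spec_nbre_jours_debut_ere; infer_instance

-- ===== CLAIM (what is proved, stated in full; the proofs are below) =====
def Claim_equal_nbre_jours_debut_ere : Prop := ∀ (year : Int), Dom_nbre_jours_debut_ere year → Spec_nbre_jours_debut_ere year (nbre_jours_debut_ere year)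

-- ===== LEMMAS AND PROOFS =====

-- A on a nonnegative year equals the closed form (with Int's ediv, divisors positive).
theorem nbre_jours_closed_form (n : Nat) :
    nbre_jours_debut_ere (n : Int)
      = 365 * (n : Int) + ((n : Int) + 3) / 4 - ((n : Int) + 99) / 100 + ((n : Int) + 399) / 400 := by
  induction n with
  | zero => simp [nbre_jours_debut_ere]
  | succ n ih =>
    have hstep : PySem.List.pyRange 0 ((n : Int) + 1) 1
        = PySem.List.pyRange 0 (n : Int) 1 ++ [(n : Int)] :=
      PySem.List.pyRange_one_succ_right (by positivity)
    have hA : nbre_jours_debut_ere ((n : Int) + 1)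
        = (if annee_bissextile (n : Int) then nbre_jours_debut_ere (n : Int) + 366
           else nbre_jours_debut_ere (n : Int) + 365) := by
      simp only [nbre_jours_debut_ere, hstep, List.foldl_append, List.foldl_cons, List.foldl_nil]
    have hcond : annee_bissextile (n : Int) = true ↔
        (((n : Int) % 4 = 0 ∧ (n : Int) % 100 ≠ 0) ∨ (n : Int) % 400 = 0) := by
      simp [annee_bissextile]
    push_cast
    rw [hA, ih]
    by_cases hb : annee_bissextile (n : Int) = true
    · rw [if_pos hb]
      rw [hcond] at hb
      omega
    · rw [if_neg hb]
      rw [hcond, not_or, not_and_or, not_not] at hb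
      omega

-- ===== VERDICT (by name: the statement is the Claim_ definition above) =====
theorem nbre_jours_debut_ere_spec : Claim_equal_nbre_jours_debut_ere := by
  intro year _
  unfold Spec_nbre_jours_debut_ere nbre_jours_debut_ere_alt
  by_cases h : year ≤ 0
  · rw [if_pos h]
    simp [nbre_jours_debut_ere, PySem.List.pyRange_one_eq_nil h]
  · rw [if_neg h]
    obtain ⟨n, rfl⟩ : ∃ n : Nat, year = (n : Int) := ⟨year.toNat, by omega⟩
    rw [nbre_jours_closed_form n,
      PySem.Int.floordiv_eq_ediv_of_pos (by norm_num),
      PySem.Int.floordiv_eq_ediv_of_pos (by norm_num),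
      PySem.Int.floordiv_eq_ediv_of_pos (by norm_num)]
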